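-- pv_equiv track=rewrite | github.com/gangseonghui997-dev/blank-app | streamlit_app.py | get_hour_branch
-- ===== SOURCE A (Python) =====
-- HOUR_BRANCH_TABLE = [
--     ((23, 0), (23, 59), "자"),
--     ((0, 0), (0, 59), "자"),
--     ((1, 0), (2, 59), "축"),
--     ((3, 0), (4, 59), "인"),
--     ((5, 0), (6, 59), "묘"),
--     ((7, 0), (8, 59), "진"),
--     ((9, 0), (10, 59), "사"),
--     ((11, 0), (12, 59), "오"),
--     ((13, 0), (14, 59), "미"),
--     ((15, 0), (16, 59), "신"),
--     ((17, 0), (18, 59), "유"),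
--     ((19, 0), (20, 59), "술"),
--     ((21, 0), (22, 59), "해"),
-- ]
--
-- def get_hour_branch(hour: int, minute: int) -> str:
--     total = hour * 60 + minute
--     for (sh, sm), (eh, em), branch in HOUR_BRANCH_TABLE:
--         start = sh * 60 + sm
--         end = eh * 60 + em
--         if start <= end:
--             if start <= total <= end:
--                 return branch
--         else:
--             if total >= start or total <= end:
--                 return branch
--     return "자"
-- ===== SOURCE B (Python) =====
-- BRANCHES = ["자", "축", "인", "묘", "진", "사", "오", "미", "신", "유", "술", "해"]
--
-- def get_hour_branch(hour: int, minute: int) -> str: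
--     total = hour * 60 + minute
--     if 0 <= total < 1440:
--         return BRANCHES[((total // 60 + 1) % 24) // 2]
--     return "자"
-- ===== Notes on version B (the rewrite author's own statement) =====
-- stated objective: simpler
-- what changed: Replaced the 13-entry (start,end,branch) range-scan loop over HOUR_BRANCH_TABLE by a single bounds check on total minutes and direct arithmetic indexing BRANCHES[((total // 60 + 1) % 24) // 2] into a 12-branch list.
import Mathlib
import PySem

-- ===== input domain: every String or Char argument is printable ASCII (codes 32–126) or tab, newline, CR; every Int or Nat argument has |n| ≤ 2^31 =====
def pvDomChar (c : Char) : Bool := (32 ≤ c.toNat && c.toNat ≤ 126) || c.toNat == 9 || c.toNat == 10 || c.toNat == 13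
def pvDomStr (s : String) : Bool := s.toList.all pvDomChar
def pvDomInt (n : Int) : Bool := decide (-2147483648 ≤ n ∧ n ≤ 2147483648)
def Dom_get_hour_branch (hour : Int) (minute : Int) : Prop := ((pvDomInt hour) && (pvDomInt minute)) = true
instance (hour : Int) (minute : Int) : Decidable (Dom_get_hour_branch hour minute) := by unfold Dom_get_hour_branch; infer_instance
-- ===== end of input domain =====

-- B replaces A's 13-entry range-scan over the table by direct arithmetic indexing
-- into the 12-branch list (objective: simpler).

-- ===== PORT A =====
def hourBranchTable : List ((Int × Int) × (Int × Int) × String) :=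
  [((23, 0), (23, 59), "자"),
   ((0, 0), (0, 59), "자"),
   ((1, 0), (2, 59), "축"),
   ((3, 0), (4, 59), "인"),
   ((5, 0), (6, 59), "묘"),
   ((7, 0), (8, 59), "진"),
   ((9, 0), (10, 59), "사"),
   ((11, 0), (12, 59), "오"),
   ((13, 0), (14, 59), "미"),
   ((15, 0), (16, 59), "신"),
   ((17, 0), (18, 59), "유"),
   ((19, 0), (20, 59), "술"),
   ((21, 0), (22, 59), "해")]

-- the for-loop of A, as structural recursion over the table
def hbScan (total : Int) : List ((Int × Int) × (Int × Int) × String) → String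
  | [] => "자"
  | (s, e, branch) :: rest =>
    let start := s.1 * 60 + s.2
    let stop := e.1 * 60 + e.2
    if start ≤ stop then
      if start ≤ total ∧ total ≤ stop then branch else hbScan total rest
    else
      if total ≥ start ∨ total ≤ stop then branch else hbScan total rest

def get_hour_branch (hour : Int) (minute : Int) : String :=
  hbScan (hour * 60 + minute) hourBranchTable

-- ===== PORT B =====
def pyBranches : List String :=
  ["자", "축", "인", "묘", "진", "사", "오", "미", "신", "유", "술", "해"]

-- BRANCHES[((total // 60 + 1) % 24) // 2]; the index is provably in [0, 11]
-- (total ∈ [0, 1440)), so pyGet? is always `some` and the getD default is never used.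
def get_hour_branch_alt (hour : Int) (minute : Int) : String :=
  let total := hour * 60 + minute
  if 0 ≤ total ∧ total < 1440 then
    (PySem.List.pyGet? pyBranches
      (PySem.Int.floordiv (PySem.Int.mod (PySem.Int.floordiv total 60 + 1) 24) 2)).getD "자"
  else "자"

-- ===== PRECONDITION & SPEC =====
def Spec_get_hour_branch (hour : Int) (minute : Int) (out : String) : Prop := out = get_hour_branch_alt hour minute
instance (hour : Int) (minute : Int) (out : String) : Decidable (Spec_get_hour_branch hour minute out) := by unfold Spec_get_hour_branch; infer_instance

-- ===== CLAIM (what is proved, stated in full; the proofs are below) =====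
def Claim_equal_get_hour_branch : Prop := ∀ (hour : Int) (minute : Int), Dom_get_hour_branch hour minute → Spec_get_hour_branch hour minute (get_hour_branch hour minute)

-- ===== LEMMAS AND PROOFS =====

-- one step of A's scan when the table row is an ordinary (start ≤ end) range
theorem hbScan_step (total s1 s2 e1 e2 : Int) (b : String)
    (rest : List ((Int × Int) × (Int × Int) × String)) (h : s1 * 60 + s2 ≤ e1 * 60 + e2) :
    hbScan total (((s1, s2), (e1, e2), b) :: rest) =
      if s1 * 60 + s2 ≤ total ∧ total ≤ e1 * 60 + e2 then b else hbScan total rest := by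
  simp [hbScan, h]

theorem hbScan_nil (total : Int) : hbScan total [] = "자" := rfl

theorem hb_key (total : Int) :
    hbScan total hourBranchTable =
      (if 0 ≤ total ∧ total < 1440 then
        (PySem.List.pyGet? pyBranches
          (PySem.Int.floordiv (PySem.Int.mod (PySem.Int.floordiv total 60 + 1) 24) 2)).getD "자"
      else "자") := by
  rw [PySem.Int.floordiv_eq_ediv_of_pos (a := total) (by norm_num : (0:Int) < 60)]
  rw [hourBranchTable]
  repeat rw [hbScan_step (h := by norm_num)]
  rw [hbScan_nil]
  by_cases hin : 0 ≤ total ∧ total < 1440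
  · rw [if_pos hin]
    obtain ⟨h0, h1⟩ := hin
    have hq0 : 0 ≤ total / 60 := by omega
    have hq1 : total / 60 < 24 := by omega
    set q := total / 60 with hqdef
    have htl : 60 * q ≤ total := by omega
    have htu : total < 60 * q + 60 := by omega
    clear hqdef h0 h1
    interval_cases q <;>
      · repeat rw [if_neg (by omega)]
        rw [if_pos (by omega)]
        decide
  · rw [if_neg hin]
    push Not at hin
    repeat rw [if_neg (by omega)]

-- ===== VERDICT (by name: the statement is the Claim_ definition above) =====
theorem get_hour_branch_spec : Claim_equal_get_hour_branch := by
  intro hour minute _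
  unfold Spec_get_hour_branch get_hour_branch get_hour_branch_alt
  exact hb_key (hour * 60 + minute)
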